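-- pv_equiv track=rewrite | github.com/soumyaamte/Illumio_assessment | flow_log_parser.py | process_logs
-- ===== SOURCE A (Python) =====
-- PROTOCOL_MAP = {
--     "6": "tcp",    # Transmission Control Protocol
--     "17": "udp",   # User Datagram Protocol
--     "1": "icmp",   # Internet Control Message Protocol
--     "47": "gre",   # Generic Routing Encapsulation
-- }
--
-- def process_logs(flow_logs, lookup_table):
--     """Process the flow logs to count tags and port/protocol combinations."""
--     tag_counts = {}
--     port_protocol_counts = {}
--
--     for entry in flow_logs:
--         dstport = entry['dstport']
--         protocol_num = entry['protocol']
--         protocol_name = PROTOCOL_MAP.get(protocol_num, "unknown")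
--
--         # Determine the tag
--         tag = lookup_table.get((dstport, protocol_name), "Untagged")
--         tag_counts[tag] = tag_counts.get(tag, 0) + 1
--
--         # Count port/protocol combinations
--         key = f"{dstport},{protocol_name}"
--         port_protocol_counts[key] = port_protocol_counts.get(key, 0) + 1
--
--     return tag_counts, port_protocol_counts
-- ===== SOURCE B (Python) =====
-- PROTOCOL_MAP = {
--     "6": "tcp",
--     "17": "udp",
--     "1": "icmp",
--     "47": "gre",
-- }
--
-- def process_logs(flow_logs, lookup_table):
--     """Process the flow logs to count tags and port/protocol combinations."""
--     # Pass 1: count each distinct (dstport, protocol_name) combination.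
--     combo_counts = {}
--     for entry in flow_logs:
--         combo = (entry['dstport'], PROTOCOL_MAP.get(entry['protocol'], "unknown"))
--         combo_counts[combo] = combo_counts.get(combo, 0) + 1
--     # Pass 2: one lookup/format per DISTINCT combo; aggregate tag totals.
--     tag_counts = {}
--     port_protocol_counts = {}
--     for (dstport, protocol_name), n in combo_counts.items():
--         tag = lookup_table.get((dstport, protocol_name), "Untagged")
--         tag_counts[tag] = tag_counts.get(tag, 0) + n
--         port_protocol_counts[f"{dstport},{protocol_name}"] = n
--     return tag_counts, port_protocol_counts
-- ===== Notes on version B (the rewrite author's own statement) =====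
-- stated objective: alternative
-- what changed: Replaces A's single per-entry loop that tallies two dicts with a two-pass grouping: first a counter keyed by the (dstport, protocol_name) combo, then one pass over the distinct combos doing one lookup/format per combo, aggregating tag totals from combo counts.
import Mathlib
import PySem

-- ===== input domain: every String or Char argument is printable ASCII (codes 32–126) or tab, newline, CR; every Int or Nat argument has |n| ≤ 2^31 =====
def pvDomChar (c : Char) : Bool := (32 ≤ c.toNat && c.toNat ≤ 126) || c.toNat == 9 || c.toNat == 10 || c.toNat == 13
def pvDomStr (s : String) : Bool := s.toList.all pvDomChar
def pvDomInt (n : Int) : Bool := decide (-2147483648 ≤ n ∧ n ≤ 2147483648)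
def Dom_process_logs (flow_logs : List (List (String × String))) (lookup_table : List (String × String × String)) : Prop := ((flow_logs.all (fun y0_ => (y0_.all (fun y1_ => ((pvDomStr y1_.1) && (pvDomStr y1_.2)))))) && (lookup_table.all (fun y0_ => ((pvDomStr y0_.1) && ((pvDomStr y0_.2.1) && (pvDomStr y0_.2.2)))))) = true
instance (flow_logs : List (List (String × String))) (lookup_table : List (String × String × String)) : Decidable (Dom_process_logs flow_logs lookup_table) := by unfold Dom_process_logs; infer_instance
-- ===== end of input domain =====

-- B replaces A's single per-entry loop tallying two dicts by a two-pass grouping: a counter keyed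
-- by the (dstport, protocol_name) combo, then one pass over the distinct combos building both outputs.

-- ===== PORT A =====
-- module constant PROTOCOL_MAP
def pvProtocolMap : PySem.Dict String String :=
  PySem.Dict.mk [("6", "tcp"), ("17", "udp"), ("1", "icmp"), ("47", "gre")]

-- the dict parameter lookup_table (keys are tuples), as a PySem.Dict
def pvLookupDict (lookup_table : List (String × String × String)) : PySem.Dict (String × String) String :=
  PySem.Dict.mk (lookup_table.map (fun e => ((e.1, e.2.1), e.2.2)))

-- entry['dstport'] / entry['protocol']: KeyError when absent (excluded by Pre_), so the total getD form is exact under Pre_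
def process_logs (flow_logs : List (List (String × String))) (lookup_table : List (String × String × String)) : (List (String × Int)) × (List (String × Int)) :=
  let r := flow_logs.foldl
    (fun (st : PySem.Dict String Int × PySem.Dict String Int) entry =>
      let dstport := (PySem.Dict.mk entry).getD "dstport" ""
      let protocol_num := (PySem.Dict.mk entry).getD "protocol" ""
      let protocol_name := pvProtocolMap.getD protocol_num "unknown"
      let tag := (pvLookupDict lookup_table).getD (dstport, protocol_name) "Untagged"
      let key := dstport ++ "," ++ protocol_name
      (st.1.insert tag (st.1.getD tag 0 + 1), st.2.insert key (st.2.getD key 0 + 1)))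
    (PySem.Dict.empty, PySem.Dict.empty)
  (r.1.items, r.2.items)

-- ===== PORT B =====
-- the combo computed for each entry in Source B's first loop
def pvComboOf (e : List (String × String)) : String × String :=
  ((PySem.Dict.mk e).getD "dstport" "",
   pvProtocolMap.getD ((PySem.Dict.mk e).getD "protocol" "") "unknown")

def process_logs_alt (flow_logs : List (List (String × String))) (lookup_table : List (String × String × String)) : (List (String × Int)) × (List (String × Int)) :=
  -- Pass 1: combo_counts
  let combo_counts := flow_logs.foldl
    (fun (d : PySem.Dict (String × String) Int) entry =>
      let combo := pvComboOf entry
      d.insert combo (d.getD combo 0 + 1))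
    PySem.Dict.empty
  -- Pass 2: iterate combo_counts.items(), one lookup/format per distinct combo
  let r := combo_counts.items.foldl
    (fun (st : PySem.Dict String Int × PySem.Dict String Int) p =>
      let tag := (pvLookupDict lookup_table).getD p.1 "Untagged"
      let key := p.1.1 ++ "," ++ p.1.2
      (st.1.insert tag (st.1.getD tag 0 + p.2), st.2.insert key p.2))
    (PySem.Dict.empty, PySem.Dict.empty)
  (r.1.items, r.2.items)

-- ===== PRECONDITION & SPEC =====
-- Pre_ excludes exactly the inputs where A raises KeyError: an entry missing the 'dstport' or 'protocol' key.
def Pre_process_logs (flow_logs : List (List (String × String))) (lookup_table : List (String × String × String)) : Prop :=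
  flow_logs.all (fun e => (PySem.Dict.mk e).contains "dstport" && (PySem.Dict.mk e).contains "protocol") = true
instance (flow_logs : List (List (String × String))) (lookup_table : List (String × String × String)) : Decidable (Pre_process_logs flow_logs lookup_table) := by unfold Pre_process_logs; infer_instance

def pvWitness_process_logs : (List (List (String × String))) × (List (String × String × String)) :=
  ([[("dstport", "25"), ("protocol", "6")], [("dstport", "80"), ("protocol", "17")]], [("25", "tcp", "mail")])

def Spec_process_logs (flow_logs : List (List (String × String))) (lookup_table : List (String × String × String)) (out : (List (String × Int)) × (List (String × Int))) : Prop := out = process_logs_alt flow_logs lookup_table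
instance (flow_logs : List (List (String × String))) (lookup_table : List (String × String × String)) (out : (List (String × Int)) × (List (String × Int))) : Decidable (Spec_process_logs flow_logs lookup_table out) := by unfold Spec_process_logs; infer_instance

-- ===== CLAIM (what is proved, stated in full; the proofs are below) =====
def Claim_equal_process_logs : Prop := ∀ (flow_logs : List (List (String × String))) (lookup_table : List (String × String × String)), Dom_process_logs flow_logs lookup_table → Pre_process_logs flow_logs lookup_table → Spec_process_logs flow_logs lookup_table (process_logs flow_logs lookup_table)

-- ===== LEMMAS AND PROOFS =====

-- the tag and formatted key of a combo
def pvTagC (lookup_table : List (String × String × String)) (c : String × String) : String :=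
  (pvLookupDict lookup_table).getD c "Untagged"
def pvFmt (c : String × String) : String := c.1 ++ "," ++ c.2

-- the protocol name is always one of five comma-free literals
theorem pname_mem (s : String) :
    pvProtocolMap.getD s "unknown" ∈ (["tcp", "udp", "icmp", "gre", "unknown"] : List String) := by
  unfold pvProtocolMap
  simp only [PySem.Dict.getD_eq_get?_getD, PySem.Dict.get?_mk_cons]
  split_ifs <;> simp [PySem.Dict.get?]

theorem comboOf_snd_mem (e : List (String × String)) :
    (pvComboOf e).2 ∈ (["tcp", "udp", "icmp", "gre", "unknown"] : List String) :=
  pname_mem _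

-- splitting off a comma-free suffix after a comma is unambiguous
theorem comma_split_inj (l1 l2 a b : List Char) (ha : ',' ∉ a) (hb : ',' ∉ b)
    (h : l1 ++ ',' :: a = l2 ++ ',' :: b) : l1 = l2 ∧ a = b := by
  induction l1 generalizing l2 with
  | nil =>
    cases l2 with
    | nil => simpa using h
    | cons y t =>
      simp only [List.nil_append, List.cons_append, List.cons.injEq] at h
      obtain ⟨rfl, rfl⟩ := h
      exact absurd (by simp : (',' : Char) ∈ t ++ ',' :: b) ha
  | cons x t ih =>
    cases l2 with
    | nil =>
      simp only [List.nil_append, List.cons_append, List.cons.injEq] at h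
      obtain ⟨rfl, rfl⟩ := h
      exact absurd (by simp : (',' : Char) ∈ t ++ ',' :: a) hb
    | cons y t2 =>
      simp only [List.cons_append, List.cons.injEq] at h
      obtain ⟨rfl, h⟩ := h
      obtain ⟨rfl, rfl⟩ := ih t2 h
      exact ⟨rfl, rfl⟩

-- pvFmt is injective on combos whose protocol name is one of the five literals
theorem fmt_inj (c1 c2 : String × String)
    (h1 : c1.2 ∈ (["tcp", "udp", "icmp", "gre", "unknown"] : List String))
    (h2 : c2.2 ∈ (["tcp", "udp", "icmp", "gre", "unknown"] : List String))
    (h : pvFmt c1 = pvFmt c2) : c1 = c2 := by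
  obtain ⟨d1, p1⟩ := c1
  obtain ⟨d2, p2⟩ := c2
  simp only [List.mem_cons] at h1 h2
  have ha : ',' ∉ p1.toList := by
    rcases h1 with rfl | rfl | rfl | rfl | rfl | h1 <;> first | decide | simp at h1
  have hb : ',' ∉ p2.toList := by
    rcases h2 with rfl | rfl | rfl | rfl | rfl | h2 <;> first | decide | simp at h2
  have h' := congrArg String.toList h
  simp only [pvFmt, String.toList_append] at h'
  have hc : (",".toList : List Char) = [','] := rfl
  rw [hc, List.append_assoc, List.append_assoc, List.singleton_append, List.singleton_append] at h'
  obtain ⟨hd, hp⟩ := comma_split_inj _ _ _ _ ha hb h'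
  exact Prod.ext (String.toList_inj.1 hd) (String.toList_inj.1 hp)

-- weighted counting fold: getD of the accumulator
theorem getD_weighted_fold (l : List (String × String)) (d : PySem.Dict String Int)
    (g : String × String → String) (w : String × String → Int) (t : String) :
    (l.foldl (fun d c => d.insert (g c) (d.getD (g c) 0 + w c)) d).getD t 0
      = d.getD t 0 + ((l.filter (fun c => g c == t)).map w).sum := by
  induction l generalizing d with
  | nil => simp
  | cons c l ih =>
    simp only [List.foldl_cons, List.filter_cons]
    rw [ih]
    by_cases hc : g c = t
    · subst hc
      simp [PySem.Dict.getD_insert_self]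
      ring
    · rw [PySem.Dict.getD_insert_of_ne _ _ _ (Ne.symm hc)]
      simp [hc]

-- first-occurrence order of images: dedup (map g (dedup xs)) = dedup (map g xs)
theorem ofList_map_ofList {α β : Type} [BEq α] [LawfulBEq α] [BEq β] [LawfulBEq β] [DecidableEq α] [DecidableEq β]
    (xs : List α) (g : α → β) :
    PySem.Set.ofList ((PySem.Set.ofList xs).map g) = PySem.Set.ofList (xs.map g) := by
  induction xs using List.reverseRecOn with
  | nil => simp [PySem.Set.ofList]
  | append_singleton xs x ih =>
    rw [PySem.Set.ofList_append_singleton, List.map_append, List.map_singleton,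
        PySem.Set.ofList_append_singleton]
    by_cases hx : x ∈ PySem.Set.ofList xs
    · rw [PySem.Set.add_of_mem hx, ih]
      have : g x ∈ PySem.Set.ofList (xs.map g) := by
        rw [PySem.Set.mem_ofList]
        exact List.mem_map_of_mem ((PySem.Set.mem_ofList _ _).1 hx)
      exact (PySem.Set.add_of_mem this).symm
    · rw [PySem.Set.add_of_not_mem hx, List.map_append, List.map_singleton,
          PySem.Set.ofList_append_singleton, ih]

-- sum of an indicator over a Nodup list
theorem sum_indicator_nodup {α : Type} [BEq α] [LawfulBEq α] [DecidableEq α] (F : List α) (hF : F.Nodup) (x : α) :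
    (F.map (fun c => if c = x then (1 : Int) else 0)).sum = if x ∈ F then 1 else 0 := by
  have h1 : (F.map (fun c => if (c == x) = true then (1 : Int) else 0)).sum = ↑(F.countP (· == x)) :=
    PySem.List.sum_map_ite_one_zero (· == x) F
  simp only [beq_iff_eq] at h1
  rw [h1]
  have h2 : F.countP (· == x) = F.count x := rfl
  rw [h2]
  by_cases hx : x ∈ F
  · have h3 : F.count x ≤ 1 := List.nodup_iff_count_le_one.1 hF x
    have h4 : 0 < F.count x := List.count_pos_iff.2 hx
    have h5 : F.count x = 1 := by omega
    rw [h5]; simp [hx]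
  · rw [List.count_eq_zero_of_not_mem hx]; simp [hx]

-- the tag-weighted sum over distinct combos is the direct tag count
theorem weighted_sum_eq_count {α : Type} [BEq α] [LawfulBEq α] [DecidableEq α] {β : Type} [BEq β] [LawfulBEq β] [DecidableEq β]
    (xs : List α) (g : α → β) (t : β) :
    (((PySem.Set.ofList xs).filter (fun c => g c == t)).map (fun c => (xs.count c : Int))).sum
      = ((xs.map g).count t : Int) := by
  induction xs using List.reverseRecOn with
  | nil => simp
  | append_singleton xs x ih =>
    have hRHS : (((xs ++ [x]).map g).count t : Int)
        = ((xs.map g).count t : Int) + (if g x = t then 1 else 0) := by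
      rw [List.map_append, List.count_append]
      by_cases hgx : g x = t
      · subst hgx; simp
      · simp only [List.map_cons, List.map_nil]
        rw [List.count_eq_zero_of_not_mem (show t ∉ [g x] from by simp; exact fun h => hgx h.symm)]
        simp [hgx]
    rw [PySem.Set.ofList_append_singleton, hRHS]
    by_cases hx : x ∈ PySem.Set.ofList xs
    · rw [PySem.Set.add_of_mem hx]
      have hx' : x ∈ xs := (PySem.Set.mem_ofList _ _).1 hx
      have hcnt : ((PySem.Set.ofList xs).filter (fun c => g c == t)).map (fun c => ((xs ++ [x]).count c : Int))
          = ((PySem.Set.ofList xs).filter (fun c => g c == t)).map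
              (fun c => (xs.count c : Int) + (if c = x then 1 else 0)) := by
        apply List.map_congr_left
        intro a _
        rw [List.count_append]
        by_cases hax : a = x
        · subst hax; simp
        · rw [List.count_eq_zero_of_not_mem (by simp [hax] : a ∉ [x])]
          simp [hax]
      rw [hcnt, PySem.List.sum_map_add_int, ih,
          sum_indicator_nodup _ (List.Nodup.filter _ (PySem.Set.nodup_ofList xs)) x]
      have hmemF : x ∈ (PySem.Set.ofList xs).filter (fun c => g c == t) ↔ g x = t := by
        simp [List.mem_filter, hx]
      by_cases hgx : g x = t
      · simp [hmemF, hgx]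
      · simp [hmemF, hgx]
    · rw [PySem.Set.add_of_not_mem hx]
      have hx' : x ∉ xs := fun hm => hx ((PySem.Set.mem_ofList _ _).2 hm)
      rw [List.filter_append]
      have hxcnt : ((xs ++ [x]).count x : Int) = 1 := by
        rw [List.count_append, List.count_eq_zero_of_not_mem hx']
        simp
      have hcnt : ((PySem.Set.ofList xs).filter (fun c => g c == t)).map (fun c => ((xs ++ [x]).count c : Int))
          = ((PySem.Set.ofList xs).filter (fun c => g c == t)).map (fun c => (xs.count c : Int)) := by
        apply List.map_congr_left
        intro a haF
        have haS : a ∈ PySem.Set.ofList xs := (List.mem_filter.1 haF).1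
        have hax : a ≠ x := fun he => hx (he ▸ haS)
        rw [List.count_append, List.count_eq_zero_of_not_mem (by simp [hax] : a ∉ [x])]
        simp
      rw [List.map_append, List.sum_append, hcnt, ih]
      by_cases hgx : g x = t
      · have hone : (([x] : List α).filter (fun c => g c == t)) = [x] := by simp [hgx]
        rw [hone]
        simp only [List.map_cons, List.map_nil, List.sum_cons, List.sum_nil, add_zero]
        rw [hxcnt]
        simp [hgx]
      · have hnil : (([x] : List α).filter (fun c => g c == t)) = [] := by simp [hgx]
        rw [hnil]
        simp [hgx]

-- ofList commutes with an injective-on-members map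
theorem ofList_map_inj {α β : Type} [BEq α] [LawfulBEq α] [BEq β] [LawfulBEq β] [DecidableEq α] [DecidableEq β]
    (xs : List α) (f : α → β) (hinj : ∀ a ∈ xs, ∀ b ∈ xs, f a = f b → a = b) :
    PySem.Set.ofList (xs.map f) = (PySem.Set.ofList xs).map f := by
  induction xs using List.reverseRecOn with
  | nil => simp [PySem.Set.ofList]
  | append_singleton xs x ih =>
    have hinj' : ∀ a ∈ xs, ∀ b ∈ xs, f a = f b → a = b := fun a ha b hb =>
      hinj a (List.mem_append_left _ ha) b (List.mem_append_left _ hb)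
    rw [List.map_append, List.map_singleton, PySem.Set.ofList_append_singleton,
        PySem.Set.ofList_append_singleton, ih hinj']
    by_cases hx : x ∈ PySem.Set.ofList xs
    · rw [PySem.Set.add_of_mem hx]
      have : f x ∈ (PySem.Set.ofList xs).map f :=
        List.mem_map_of_mem hx
      rw [PySem.Set.add_of_mem this]
    · rw [PySem.Set.add_of_not_mem hx]
      have : f x ∉ (PySem.Set.ofList xs).map f := by
        intro hm
        obtain ⟨a, haS, hfa⟩ := List.mem_map.1 hm
        have ha : a ∈ xs := (PySem.Set.mem_ofList _ _).1 haS
        have : a = x := hinj a (List.mem_append_left _ ha) x (by simp) hfa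
        exact hx (this ▸ haS)
      rw [PySem.Set.add_of_not_mem this, List.map_append, List.map_singleton]

-- count through an injective-on-members map
theorem count_map_inj {α β : Type} [BEq α] [LawfulBEq α] [BEq β] [LawfulBEq β] [DecidableEq α] [DecidableEq β]
    (xs : List α) (f : α → β) (c : α) (hinj : ∀ a ∈ xs, f a = f c → a = c) :
    (xs.map f).count (f c) = xs.count c := by
  rw [List.count, List.count, List.countP_map]
  apply List.countP_congr
  intro a ha
  simp only [Function.comp_apply, beq_iff_eq]
  by_cases hac : a = c
  · simp [hac]
  · have hf : ¬ f a = f c := fun hf => hac (hinj a ha hf)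
    simp [hac, hf]

-- a unit-increment counting loop over mapped keys is Counter(map)
theorem counter_fold {κ β : Type} [BEq κ] [LawfulBEq κ] (g : β → κ) (l : List β) :
    l.foldl (fun (d : PySem.Dict κ Int) e => d.insert (g e) (d.getD (g e) 0 + 1)) PySem.Dict.empty
      = PySem.Dict.counter (l.map g) := by
  rw [← PySem.Dict.foldl_insert_getD_add_one_eq_counter, List.foldl_map]

-- B's tag aggregation over distinct combos equals A's per-entry tag counter
theorem tagfold_eq_counter (lookup_table : List (String × String × String)) (combos : List (String × String)) :
    (PySem.Set.ofList combos).foldl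
        (fun (d : PySem.Dict String Int) c =>
          d.insert (pvTagC lookup_table c) (d.getD (pvTagC lookup_table c) 0 + (combos.count c : Int)))
        PySem.Dict.empty
      = PySem.Dict.counter (combos.map (pvTagC lookup_table)) := by
  apply PySem.Dict.ext
  have hnd : ((PySem.Set.ofList combos).foldl
      (fun (d : PySem.Dict String Int) c =>
        d.insert (pvTagC lookup_table c) (d.getD (pvTagC lookup_table c) 0 + (combos.count c : Int)))
      PySem.Dict.empty).keys.Nodup :=
    PySem.Dict.nodup_keys_foldl_insert_key _ (pvTagC lookup_table) _ _ (by simp [PySem.Dict.keys_empty])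
  have hkeys : ((PySem.Set.ofList combos).foldl
      (fun (d : PySem.Dict String Int) c =>
        d.insert (pvTagC lookup_table c) (d.getD (pvTagC lookup_table c) 0 + (combos.count c : Int)))
      PySem.Dict.empty).keys = PySem.Set.ofList (combos.map (pvTagC lookup_table)) := by
    rw [PySem.Dict.keys_foldl_insert_key, PySem.Dict.keys_empty]
    show PySem.Set.ofList ((PySem.Set.ofList combos).map (pvTagC lookup_table)) = _
    exact ofList_map_ofList combos (pvTagC lookup_table)
  rw [PySem.Dict.items_counter, PySem.Dict.items_eq_map_keys _ hnd 0, hkeys]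
  apply List.map_congr_left
  intro t _
  have hg := getD_weighted_fold (PySem.Set.ofList combos) PySem.Dict.empty (pvTagC lookup_table)
      (fun c => (combos.count c : Int)) t
  simp only [PySem.Dict.getD_empty, zero_add] at hg
  rw [hg, weighted_sum_eq_count combos (pvTagC lookup_table) t]


-- B's per-distinct-combo key insertion equals A's per-entry key counter
theorem keyfold_eq_counter (combos : List (String × String))
    (hsnd : ∀ c ∈ combos, c.2 ∈ (["tcp", "udp", "icmp", "gre", "unknown"] : List String)) :
    (PySem.Set.ofList combos).foldl
        (fun (d : PySem.Dict String Int) c => d.insert (pvFmt c) ((combos.count c : Int)))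
        PySem.Dict.empty
      = PySem.Dict.counter (combos.map pvFmt) := by
  have hinj : ∀ a ∈ combos, ∀ b ∈ combos, pvFmt a = pvFmt b → a = b :=
    fun a ha b hb h => fmt_inj a b (hsnd a ha) (hsnd b hb) h
  have hndmap : ((PySem.Set.ofList combos).map pvFmt).Nodup := by
    rw [← ofList_map_inj combos pvFmt hinj]
    exact PySem.Set.nodup_ofList _
  apply PySem.Dict.ext
  rw [PySem.Dict.items_foldl_insert_fresh _ pvFmt (fun c => (combos.count c : Int)) PySem.Dict.empty
      (fun a _ => by simp [pysem]) hndmap]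
  rw [PySem.Dict.items_counter, ofList_map_inj combos pvFmt hinj]
  have hempty : (PySem.Dict.empty : PySem.Dict String Int).items = [] := rfl
  rw [hempty, List.nil_append]
  simp only [List.map_map, Function.comp_def]
  apply List.map_congr_left
  intro c hc
  have hc' : c ∈ combos := (PySem.Set.mem_ofList _ _).1 hc
  rw [count_map_inj combos pvFmt c (fun a ha h => hinj a ha c hc' h)]

theorem process_logs_eq_alt (flow_logs : List (List (String × String))) (lookup_table : List (String × String × String)) :
    process_logs flow_logs lookup_table = process_logs_alt flow_logs lookup_table := by
  have hsnd : ∀ c ∈ flow_logs.map pvComboOf, c.2 ∈ (["tcp", "udp", "icmp", "gre", "unknown"] : List String) := by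
    intro c hc
    obtain ⟨e, -, rfl⟩ := List.mem_map.1 hc
    exact comboOf_snd_mem e
  have hmapT : flow_logs.map (fun e => pvTagC lookup_table (pvComboOf e))
      = (flow_logs.map pvComboOf).map (pvTagC lookup_table) := by
    simp [List.map_map, Function.comp_def]
  have hmapK : flow_logs.map (fun e => pvFmt (pvComboOf e))
      = (flow_logs.map pvComboOf).map pvFmt := by
    simp [List.map_map, Function.comp_def]
  show
    ((flow_logs.foldl
        (fun (st : PySem.Dict String Int × PySem.Dict String Int) entry =>
          (st.1.insert (pvTagC lookup_table (pvComboOf entry))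
             (st.1.getD (pvTagC lookup_table (pvComboOf entry)) 0 + 1),
           st.2.insert (pvFmt (pvComboOf entry))
             (st.2.getD (pvFmt (pvComboOf entry)) 0 + 1)))
        (PySem.Dict.empty, PySem.Dict.empty)).1.items,
     (flow_logs.foldl
        (fun (st : PySem.Dict String Int × PySem.Dict String Int) entry =>
          (st.1.insert (pvTagC lookup_table (pvComboOf entry))
             (st.1.getD (pvTagC lookup_table (pvComboOf entry)) 0 + 1),
           st.2.insert (pvFmt (pvComboOf entry))
             (st.2.getD (pvFmt (pvComboOf entry)) 0 + 1)))
        (PySem.Dict.empty, PySem.Dict.empty)).2.items)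
    =
    ((((flow_logs.foldl
          (fun (d : PySem.Dict (String × String) Int) entry =>
            d.insert (pvComboOf entry) (d.getD (pvComboOf entry) 0 + 1))
          PySem.Dict.empty).items).foldl
        (fun (st : PySem.Dict String Int × PySem.Dict String Int) p =>
          (st.1.insert (pvTagC lookup_table p.1) (st.1.getD (pvTagC lookup_table p.1) 0 + p.2),
           st.2.insert (pvFmt p.1) p.2))
        (PySem.Dict.empty, PySem.Dict.empty)).1.items,
     (((flow_logs.foldl
          (fun (d : PySem.Dict (String × String) Int) entry =>
            d.insert (pvComboOf entry) (d.getD (pvComboOf entry) 0 + 1))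
          PySem.Dict.empty).items).foldl
        (fun (st : PySem.Dict String Int × PySem.Dict String Int) p =>
          (st.1.insert (pvTagC lookup_table p.1) (st.1.getD (pvTagC lookup_table p.1) 0 + p.2),
           st.2.insert (pvFmt p.1) p.2))
        (PySem.Dict.empty, PySem.Dict.empty)).2.items)
  simp only [counter_fold, PySem.Dict.items_counter, List.foldl_map]
  rw [PySem.List.foldl_prod_mk
        (f := fun (d : PySem.Dict String Int) e =>
          d.insert (pvTagC lookup_table (pvComboOf e)) (d.getD (pvTagC lookup_table (pvComboOf e)) 0 + 1))
        (g := fun (d : PySem.Dict String Int) e =>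
          d.insert (pvFmt (pvComboOf e)) (d.getD (pvFmt (pvComboOf e)) 0 + 1)),
      PySem.List.foldl_prod_mk
        (f := fun (d : PySem.Dict String Int) (c : String × String) =>
          d.insert (pvTagC lookup_table c)
            (d.getD (pvTagC lookup_table c) 0 + ((flow_logs.map pvComboOf).count c : Int)))
        (g := fun (d : PySem.Dict String Int) (c : String × String) =>
          d.insert (pvFmt c) (((flow_logs.map pvComboOf).count c : Int))),
      counter_fold (fun e => pvTagC lookup_table (pvComboOf e)) flow_logs,
      counter_fold (fun e => pvFmt (pvComboOf e)) flow_logs,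
      tagfold_eq_counter lookup_table (flow_logs.map pvComboOf),
      keyfold_eq_counter (flow_logs.map pvComboOf) hsnd,
      hmapT, hmapK]

-- ===== VERDICT (by name: the statement is the Claim_ definition above) =====
theorem process_logs_spec : Claim_equal_process_logs := by
  intro flow_logs lookup_table _ _
  unfold Spec_process_logs
  exact process_logs_eq_alt flow_logs lookup_table
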